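-- pv_equiv track=rewrite | github.com/Mukataatvstation480/agent-harness | app/harness/deep_research.py | _build_roadmap
-- ===== SOURCE A (Python) =====
-- from typing import Any
--
-- def _build_roadmap(dimensions: list[dict[str, Any]]) -> list[dict[str, Any]]:
--     behind = [item for item in dimensions if item.get("verdict") == "behind"]
--     mixed = [item for item in dimensions if item.get("verdict") == "mixed"]
--     top_gap = behind[0]["label"] if behind else (mixed[0]["label"] if mixed else "Result Surface")
--     return [
--         {"phase": "Phase 1 - Sharpen The First Deliverable", "focus": "Make final reports, patch packs, and operating plans noticeably better than a direct one-shot model answer.", "target": top_gap},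
--         {"phase": "Phase 2 - Turn Skills Into Execution Modules", "focus": "Let skills declare evidence needs, artifact outputs, and validation gates instead of acting like prompt snippets.", "target": "Capability Packaging"},
--         {"phase": "Phase 3 - Productize Threads And Workspace", "focus": "Expose thread events, artifact views, workspace controls, and operator interventions as a coherent runtime surface.", "target": "Workspace Product Surface"},
--         {"phase": "Phase 4 - Push The Thread-First Advantage", "focus": "Use the same executable task graph for research, engineering, analysis, and operations so the framework stays truly general-purpose.", "target": "Runtime Closure"},
--     ]
-- ===== SOURCE B (Python) =====
-- def _build_roadmap(dimensions):
--     # Single short-circuiting pass: grab the first "behind" item (break at once),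
--     # otherwise remember the first "mixed" item; extract its label only at the end.
--     first_mixed = None
--     top_gap = None
--     for item in dimensions:
--         verdict = item.get("verdict")
--         if verdict == "behind":
--             top_gap = item["label"]
--             break
--         if verdict == "mixed" and first_mixed is None:
--             first_mixed = item
--     if top_gap is None:
--         top_gap = first_mixed["label"] if first_mixed is not None else "Result Surface"
--     return [
--         {"phase": "Phase 1 - Sharpen The First Deliverable", "focus": "Make final reports, patch packs, and operating plans noticeably better than a direct one-shot model answer.", "target": top_gap},
--         {"phase": "Phase 2 - Turn Skills Into Execution Modules", "focus": "Let skills declare evidence needs, artifact outputs, and validation gates instead of acting like prompt snippets.", "target": "Capability Packaging"},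
--         {"phase": "Phase 3 - Productize Threads And Workspace", "focus": "Expose thread events, artifact views, workspace controls, and operator interventions as a coherent runtime surface.", "target": "Workspace Product Surface"},
--         {"phase": "Phase 4 - Push The Thread-First Advantage", "focus": "Use the same executable task graph for research, engineering, analysis, and operations so the framework stays truly general-purpose.", "target": "Runtime Closure"},
--     ]
-- ===== Notes on version B (the rewrite author's own statement) =====
-- stated objective: simpler
-- what changed: Replaces A's two full filtering comprehensions plus indexing with one short-circuiting pass that breaks at the first 'behind' item and remembers the first 'mixed' item as a fallback.
-- outside the precondition, e.g. on _build_roadmap([{'verdict': 'behind'}]): A raises KeyError, B raises KeyError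
import Mathlib
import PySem

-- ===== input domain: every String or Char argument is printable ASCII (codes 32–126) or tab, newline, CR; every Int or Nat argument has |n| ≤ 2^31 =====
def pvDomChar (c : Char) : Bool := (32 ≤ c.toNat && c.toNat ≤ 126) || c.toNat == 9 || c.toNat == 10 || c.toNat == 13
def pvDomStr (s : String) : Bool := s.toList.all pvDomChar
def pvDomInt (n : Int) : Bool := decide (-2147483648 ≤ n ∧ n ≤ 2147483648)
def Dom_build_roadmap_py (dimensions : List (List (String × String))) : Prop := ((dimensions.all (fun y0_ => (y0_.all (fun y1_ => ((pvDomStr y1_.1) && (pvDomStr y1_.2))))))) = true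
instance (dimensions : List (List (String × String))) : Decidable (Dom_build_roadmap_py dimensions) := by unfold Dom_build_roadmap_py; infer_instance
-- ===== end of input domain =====

-- B replaces A's two full filter passes by one short-circuiting scan (objective: simpler).

-- ===== PORT A =====
-- assoc-list first-match lookup = Python dict lookup (dict.get / d[k]); exact: dict keys are unique
def pvLookup (item : List (String × String)) (k : String) : Option String :=
  (item.find? (fun p => p.1 == k)).map (·.2)

-- the fixed four-entry literal roadmap both Pythons return (shared literal, not logic)
def pvRoadmap (top_gap : String) : List (List (String × String)) :=
  [ [("phase", "Phase 1 - Sharpen The First Deliverable"), ("focus", "Make final reports, patch packs, and operating plans noticeably better than a direct one-shot model answer."), ("target", top_gap)],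
    [("phase", "Phase 2 - Turn Skills Into Execution Modules"), ("focus", "Let skills declare evidence needs, artifact outputs, and validation gates instead of acting like prompt snippets."), ("target", "Capability Packaging")],
    [("phase", "Phase 3 - Productize Threads And Workspace"), ("focus", "Expose thread events, artifact views, workspace controls, and operator interventions as a coherent runtime surface."), ("target", "Workspace Product Surface")],
    [("phase", "Phase 4 - Push The Thread-First Advantage"), ("focus", "Use the same executable task graph for research, engineering, analysis, and operations so the framework stays truly general-purpose."), ("target", "Runtime Closure")] ]

-- A: two comprehensions, then behind[0]["label"] / mixed[0]["label"] (Pre_ rules out the KeyError; .getD "" is unreachable under Pre_)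
def build_roadmap_py (dimensions : List (List (String × String))) : List (List (String × String)) :=
  let behind := dimensions.filter (fun item => pvLookup item "verdict" == some "behind")
  let mixed := dimensions.filter (fun item => pvLookup item "verdict" == some "mixed")
  let top_gap :=
    match behind with
    | item :: _ => (pvLookup item "label").getD ""
    | [] =>
      match mixed with
      | item :: _ => (pvLookup item "label").getD ""
      | [] => "Result Surface"
  pvRoadmap top_gap

-- ===== PORT B =====
-- B's loop: break on first "behind", remember the first "mixed" item; label extracted at the end
def pvScan (items : List (List (String × String))) (firstMixed : Option (List (String × String))) : String :=
  match items with
  | [] =>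
    match firstMixed with
    | some m => (pvLookup m "label").getD ""
    | none => "Result Surface"
  | item :: rest =>
    let verdict := pvLookup item "verdict"
    if verdict == some "behind" then (pvLookup item "label").getD ""
    else if verdict == some "mixed" && firstMixed == none then pvScan rest (some item)
    else pvScan rest firstMixed

def build_roadmap_py_alt (dimensions : List (List (String × String))) : List (List (String × String)) :=
  pvRoadmap (pvScan dimensions none)

-- ===== PRECONDITION & SPEC =====
-- Pre_ excludes exactly the inputs where Python A raises KeyError: the selected item
-- (first "behind" item, else first "mixed" item) has no "label" key.
def Pre_build_roadmap_py (dimensions : List (List (String × String))) : Prop :=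
  (match dimensions.find? (fun item => pvLookup item "verdict" == some "behind") with
   | some item => (pvLookup item "label").isSome
   | none =>
     match dimensions.find? (fun item => pvLookup item "verdict" == some "mixed") with
     | some item => (pvLookup item "label").isSome
     | none => true) = true
instance (dimensions : List (List (String × String))) : Decidable (Pre_build_roadmap_py dimensions) := by unfold Pre_build_roadmap_py; infer_instance

def pvWitness_build_roadmap_py : (List (List (String × String))) :=
  [[("verdict", "mixed"), ("label", "Result Quality")], [("verdict", "behind"), ("label", "Depth")]]

def Spec_build_roadmap_py (dimensions : List (List (String × String))) (out : List (List (String × String))) : Prop := out = build_roadmap_py_alt dimensions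
instance (dimensions : List (List (String × String))) (out : List (List (String × String))) : Decidable (Spec_build_roadmap_py dimensions out) := by unfold Spec_build_roadmap_py; infer_instance

-- ===== CLAIM (what is proved, stated in full; the proofs are below) =====
def Claim_equal_build_roadmap_py : Prop := ∀ (dimensions : List (List (String × String))), Dom_build_roadmap_py dimensions → Pre_build_roadmap_py dimensions → Spec_build_roadmap_py dimensions (build_roadmap_py dimensions)

-- ===== LEMMAS AND PROOFS =====
-- Loop invariant: pvScan computes A's top_gap, with the accumulator standing for an
-- earlier first-"mixed" item (which takes precedence over any "mixed" item in `items`).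
theorem pvScan_eq (items : List (List (String × String))) (acc : Option (List (String × String))) :
    pvScan items acc =
      (match items.filter (fun item => pvLookup item "verdict" == some "behind") with
       | item :: _ => (pvLookup item "label").getD ""
       | [] =>
         match acc with
         | some m => (pvLookup m "label").getD ""
         | none =>
           match items.filter (fun item => pvLookup item "verdict" == some "mixed") with
           | item :: _ => (pvLookup item "label").getD ""
           | [] => "Result Surface") := by
  induction items generalizing acc with
  | nil => rfl
  | cons item rest ih =>
    simp only [pvScan, List.filter_cons]
    by_cases hb : pvLookup item "verdict" == some "behind"
    · simp [hb]
    · by_cases hm : pvLookup item "verdict" == some "mixed"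
      · cases acc with
        | none => simp [hb, hm, ih]
        | some m => simp [hb, hm, ih]
      · simp [hb, hm, ih]

-- ===== VERDICT (by name: the statement is the Claim_ definition above) =====
theorem build_roadmap_py_spec : Claim_equal_build_roadmap_py := by
  intro dimensions _ _
  unfold Spec_build_roadmap_py build_roadmap_py build_roadmap_py_alt
  rw [pvScan_eq]
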